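-- pv_equiv track=rewrite | github.com/vladimir-ionita/AdventOfCode | 2018/day2/PuzzleD2P1.py | does_word_contain_double_and_triple_letter
-- ===== SOURCE A (Python) =====
-- def get_canonic_form(word):
--     import collections
--
--     dictionary = collections.defaultdict(int)
--     for character in word:
--         dictionary[character] += 1
--     return dictionary
--
-- def does_word_contain_double_and_triple_letter(word):
--     canonic_form = get_canonic_form(word)
--
--     double_letters = False
--     triple_letters = False
--     for key, value in canonic_form.items():
--         if value == 2:
--             double_letters = True
--         if value == 3:
--             triple_letters = True
--
--     return double_letters, triple_letters
-- ===== SOURCE B (Python) =====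
-- def does_word_contain_double_and_triple_letter(word):
--     chars = list(word)
--     return (any(chars.count(c) == 2 for c in chars),
--             any(chars.count(c) == 3 for c in chars))
-- ===== Notes on version B (the rewrite author's own statement) =====
-- stated objective: simpler
-- what changed: B keeps no counting structure at all: it does two brute-force passes, asking for each character whether its occurrence count in the list (via the inner scan list.count) is exactly 2 resp. 3, instead of A's build-a-defaultdict-histogram pass followed by a scan over its items.
import Mathlib
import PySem

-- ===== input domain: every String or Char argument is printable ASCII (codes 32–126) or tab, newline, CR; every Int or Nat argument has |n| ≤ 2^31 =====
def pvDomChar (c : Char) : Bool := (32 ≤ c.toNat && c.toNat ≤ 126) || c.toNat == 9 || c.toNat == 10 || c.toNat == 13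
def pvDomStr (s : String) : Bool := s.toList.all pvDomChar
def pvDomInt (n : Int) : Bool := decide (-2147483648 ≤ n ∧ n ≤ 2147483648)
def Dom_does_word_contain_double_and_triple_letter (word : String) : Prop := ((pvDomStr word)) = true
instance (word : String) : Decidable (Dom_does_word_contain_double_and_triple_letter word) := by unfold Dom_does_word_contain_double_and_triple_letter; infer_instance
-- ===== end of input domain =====

-- B drops A's histogram entirely: two brute-force any-passes with list.count as the inner scan (objective: simpler; B is quadratic, not faster).

-- ===== PORT A =====
-- helper get_canonic_form: defaultdict(int) counting loop
def pvGetCanonicForm (word : String) : PySem.Dict Char Int :=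
  word.toList.foldl (fun d c => d.modify c 0 (· + 1)) PySem.Dict.empty

def does_word_contain_double_and_triple_letter (word : String) : Bool × Bool :=
  let canonic_form := pvGetCanonicForm word
  canonic_form.items.foldl
    (fun p kv =>
      (if kv.2 == 2 then true else p.1,
       if kv.2 == 3 then true else p.2))
    (false, false)

-- ===== PORT B =====
def does_word_contain_double_and_triple_letter_alt (word : String) : Bool × Bool :=
  let chars := word.toList
  (chars.any (fun c => PySem.List.count chars c == 2),
   chars.any (fun c => PySem.List.count chars c == 3))

-- ===== PRECONDITION & SPEC =====
def Spec_does_word_contain_double_and_triple_letter (word : String) (out : Bool × Bool) : Prop := out = does_word_contain_double_and_triple_letter_alt word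
instance (word : String) (out : Bool × Bool) : Decidable (Spec_does_word_contain_double_and_triple_letter word out) := by unfold Spec_does_word_contain_double_and_triple_letter; infer_instance

-- ===== CLAIM =====
def Claim_equal_does_word_contain_double_and_triple_letter : Prop := ∀ (word : String), Dom_does_word_contain_double_and_triple_letter word → Spec_does_word_contain_double_and_triple_letter word (does_word_contain_double_and_triple_letter word)

-- ===== LEMMAS AND PROOFS =====

-- A's fold over (key, value) items sets each flag iff some value hits 2 / 3.
theorem pvFoldA (l : List (Char × Int)) (d t : Bool) :
    l.foldl (fun p kv =>
      ((if kv.2 == 2 then true else p.1),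
       (if kv.2 == 3 then true else p.2))) (d, t)
    = (d || l.any (fun kv => kv.2 == 2), t || l.any (fun kv => kv.2 == 3)) := by
  induction l generalizing d t with
  | nil => simp
  | cons kv rest ih =>
    simp only [List.foldl_cons, List.any_cons, ih]
    simp only [Prod.mk.injEq]
    constructor <;> (split_ifs with h <;> simp [h])

-- "some distinct character's count is k" iff "some character's count is k"
theorem pvAnyCount (chars : List Char) (k : Int) :
    ((PySem.Set.ofList chars).map (fun c => (c, (chars.count c : Int)))).any
        (fun kv => kv.2 == k)
      = chars.any (fun c => ((chars.count c : Int) == k)) := by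
  rw [Bool.eq_iff_iff]
  simp only [List.any_map, List.any_eq_true, Function.comp, beq_iff_eq,
    PySem.Set.mem_ofList]

theorem does_word_contain_double_and_triple_letter_spec' (word : String) :
    does_word_contain_double_and_triple_letter word
      = does_word_contain_double_and_triple_letter_alt word := by
  unfold does_word_contain_double_and_triple_letter
    does_word_contain_double_and_triple_letter_alt pvGetCanonicForm
  dsimp only
  rw [show word.toList.foldl (fun d c => d.modify c 0 (· + 1)) PySem.Dict.empty
        = PySem.Dict.counter word.toList from rfl,
      PySem.Dict.items_counter, pvFoldA, pvAnyCount, pvAnyCount]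
  refine Prod.ext ?_ ?_ <;>
  · simp only [PySem.List.count_eq, Bool.false_or]
    rw [Bool.eq_iff_iff]
    simp only [List.any_eq_true, beq_iff_eq]
    constructor <;> (rintro ⟨c, hc, h⟩; exact ⟨c, hc, by exact_mod_cast h⟩)

-- ===== VERDICT =====
theorem does_word_contain_double_and_triple_letter_spec : Claim_equal_does_word_contain_double_and_triple_letter := by
  intro word _
  exact does_word_contain_double_and_triple_letter_spec' word
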